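-- pv_equiv track=rewrite | github.com/dengguojie/vue-element-admin | auto_schedule/python/tbe/dsl/unify_schedule/bn_update_grad_schedule.py | _find_closest_factor
-- ===== SOURCE A (Python) =====
-- def _find_closest_factor(factors, value):
--     """
--     find closest factor
--     """
--     if not factors:
--         return None
--     factors.sort()
--     index = 0
--     is_find = False
--     for i in range(0, len(factors), 1):
--         if factors[i] > value:
--             index = i
--             is_find = True
--             break
--     if is_find:
--         if index > 0:
--             index = index - 1
--     else:
--         index = len(factors) - 1
--
--     closest_factor = factors[index]
--     return closest_factor
-- ===== SOURCE B (Python) =====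
-- def _find_closest_factor(factors, value):
--     """
--     find closest factor
--     """
--     if not factors:
--         return None
--     factors.sort()
--     lo = 0
--     hi = len(factors)
--     while lo < hi:
--         mid = (lo + hi) // 2
--         if value < factors[mid]:
--             hi = mid
--         else:
--             lo = mid + 1
--     return factors[lo - 1] if lo > 0 else factors[0]
-- ===== Notes on version B (the rewrite author's own statement) =====
-- stated objective: alternative
-- what changed: The linear scan for the first sorted element greater than value is replaced by a hand-written bisect_right-style binary search over the sorted list; the guard, the in-place sort and the idx==0 -> factors[0] corner are kept.
import Mathlib
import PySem

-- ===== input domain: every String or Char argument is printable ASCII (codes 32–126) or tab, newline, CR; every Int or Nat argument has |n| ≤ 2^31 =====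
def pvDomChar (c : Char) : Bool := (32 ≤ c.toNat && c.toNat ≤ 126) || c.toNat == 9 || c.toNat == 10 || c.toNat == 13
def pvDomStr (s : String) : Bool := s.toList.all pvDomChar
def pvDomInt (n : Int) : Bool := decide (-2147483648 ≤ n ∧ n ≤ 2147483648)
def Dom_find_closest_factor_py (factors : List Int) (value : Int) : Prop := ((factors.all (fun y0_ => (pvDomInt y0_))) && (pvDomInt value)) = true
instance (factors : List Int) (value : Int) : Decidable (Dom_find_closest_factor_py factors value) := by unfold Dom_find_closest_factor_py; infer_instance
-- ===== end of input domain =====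

-- B replaces A's linear scan for the first sorted element greater than value by a
-- hand-written bisect_right-style binary search (objective: alternative). Both A and B
-- sort `factors` in place in Python; the equivalence proved is about the return value.


-- ===== PORT A =====
-- the 'for i in range(0, len(factors), 1): if factors[i] > value: …; break' loop,
-- folded over the (already materialised) range list with early exit; state = (index, is_find)
def fcfScan (s : List Int) (value : Int) : List Int → Int × Bool
  | [] => (0, false)
  | i :: rest =>
      if (PySem.List.pyGet? s i).getD 0 > value then (i, true)
      else fcfScan s value rest

def find_closest_factor_py (factors : List Int) (value : Int) : Option Int :=
  if factors = [] then none
  else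
    let s := PySem.List.sorted factors (fun x => x) false
    let p := fcfScan s value (PySem.List.pyRange 0 (s.length : Int) 1)
    let index := p.1
    let is_find := p.2
    let index2 : Int := if is_find then (if index > 0 then index - 1 else index)
                        else (s.length : Int) - 1
    PySem.List.pyGet? s index2

-- ===== PORT B =====
-- the 'while lo < hi' binary-search loop of Source B, as recursion on (hi - lo)
def fcfBsr (s : List Int) (value : Int) (lo hi : Int) : Int :=
  if _h : lo < hi then
    let mid := PySem.Int.floordiv (lo + hi) 2
    if value < (PySem.List.pyGet? s mid).getD 0 then fcfBsr s value lo mid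
    else fcfBsr s value (mid + 1) hi
  else lo
termination_by (hi - lo).toNat
decreasing_by
  · have : PySem.Int.floordiv (lo + hi) 2 < hi :=
      (PySem.Int.floordiv_lt_iff_lt_mul (by omega)).mpr (by omega)
    have : lo ≤ PySem.Int.floordiv (lo + hi) 2 :=
      (PySem.Int.le_floordiv_iff_mul_le (by omega)).mpr (by omega)
    omega
  · have : lo ≤ PySem.Int.floordiv (lo + hi) 2 :=
      (PySem.Int.le_floordiv_iff_mul_le (by omega)).mpr (by omega)
    omega

def find_closest_factor_py_alt (factors : List Int) (value : Int) : Option Int :=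
  if factors = [] then none
  else
    let s := PySem.List.sorted factors (fun x => x) false
    let lo := fcfBsr s value 0 (s.length : Int)
    if lo > 0 then PySem.List.pyGet? s (lo - 1) else PySem.List.pyGet? s 0

-- ===== PRECONDITION & SPEC =====
def Spec_find_closest_factor_py (factors : List Int) (value : Int) (out : Option Int) : Prop := out = find_closest_factor_py_alt factors value
instance (factors : List Int) (value : Int) (out : Option Int) : Decidable (Spec_find_closest_factor_py factors value out) := by unfold Spec_find_closest_factor_py; infer_instance

-- ===== CLAIM (what is proved, stated in full; the proofs are below) =====
def Claim_equal_find_closest_factor_py : Prop := ∀ (factors : List Int) (value : Int), Dom_find_closest_factor_py factors value → Spec_find_closest_factor_py factors value (find_closest_factor_py factors value)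

-- ===== LEMMAS AND PROOFS =====

-- F s value = number of leading elements ≤ value = (on a sorted list) the index Python's
-- scan / bisect_right both locate
def fcfF (s : List Int) (value : Int) : Nat := (s.takeWhile (fun x => decide (x ≤ value))).length

theorem fcfF_le (s : List Int) (value : Int) : fcfF s value ≤ s.length :=
  (List.takeWhile_prefix _).length_le

theorem fcfF_getElem?_le (s : List Int) (value : Int) (i : Nat) (hi : i < fcfF s value)
    (y : Int) (hy : s[i]? = some y) : y ≤ value := by
  induction s generalizing i with
  | nil => simp at hy
  | cons x xs ih =>
    by_cases hx : x ≤ value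
    · have hF : fcfF (x :: xs) value = fcfF xs value + 1 := by
        simp [fcfF, List.takeWhile, hx]
      rw [hF] at hi
      cases i with
      | zero => simp at hy; omega
      | succ j => exact ih j (by omega) (by simpa using hy)
    · have hF : fcfF (x :: xs) value = 0 := by simp [fcfF, List.takeWhile, hx]
      omega

theorem fcfF_getElem?_gt (s : List Int) (value : Int) (y : Int)
    (hy : s[fcfF s value]? = some y) : value < y := by
  induction s with
  | nil => simp at hy
  | cons x xs ih =>
    by_cases hx : x ≤ value
    · have hF : fcfF (x :: xs) value = fcfF xs value + 1 := by
        simp [fcfF, List.takeWhile, hx]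
      rw [hF] at hy
      exact ih (by simpa using hy)
    · have hF : fcfF (x :: xs) value = 0 := by simp [fcfF, List.takeWhile, hx]
      rw [hF] at hy
      simp at hy
      omega

theorem fcfScan_range (s : List Int) (value : Int) (j : Nat) (hj : j ≤ s.length)
    (hjF : j ≤ fcfF s value) :
    fcfScan s value (PySem.List.pyRange (j : Int) (s.length : Int) 1) =
      (if fcfF s value < s.length then ((fcfF s value : Int), true) else ((0 : Int), false)) := by
  by_cases h : j < s.length
  · rw [PySem.List.pyRange_one_cons (by exact_mod_cast h)]
    simp only [fcfScan]
    rw [PySem.List.pyGet?_natCast, List.getElem?_eq_getElem h]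
    by_cases hgt : value < s[j]
    · have hFj : fcfF s value ≤ j := by
        by_contra hc
        have := fcfF_getElem?_le s value j (by omega) s[j] (List.getElem?_eq_getElem h)
        omega
      have hFeq : fcfF s value = j := le_antisymm hFj hjF
      simp [hgt, hFeq, h]
    · have hjF' : j + 1 ≤ fcfF s value := by
        rcases Nat.lt_or_ge j (fcfF s value) with hlt | hge
        · omega
        · have hFeq : fcfF s value = j := le_antisymm hge hjF
          have := fcfF_getElem?_gt s value s[j] (by rw [hFeq]; exact List.getElem?_eq_getElem h)
          omega
      have hcast : ((j : Int) + 1) = ((j + 1 : Nat) : Int) := by push_cast; ring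
      rw [if_neg (by simpa using hgt), hcast]
      exact fcfScan_range s value (j + 1) (by omega) hjF'
  · have hjn : j = s.length := by omega
    have hFn : fcfF s value = s.length := le_antisymm (fcfF_le s value) (hjn ▸ hjF)
    rw [PySem.List.pyRange_one_eq_nil (by omega)]
    simp [fcfScan, hFn]
termination_by s.length - j
decreasing_by omega

theorem fcfBsr_correct (s : List Int) (value : Int) (hs : s.Pairwise (· ≤ ·)) (lo hi : Int) (hlo : 0 ≤ lo)
    (h1 : lo ≤ (fcfF s value : Int)) (h2 : (fcfF s value : Int) ≤ hi) (h3 : hi ≤ (s.length : Int)) :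
    fcfBsr s value lo hi = (fcfF s value : Int) := by
  by_cases h : lo < hi
  · rw [fcfBsr, dif_pos h]
    show (if value < (PySem.List.pyGet? s (PySem.Int.floordiv (lo + hi) 2)).getD 0 then
            fcfBsr s value lo (PySem.Int.floordiv (lo + hi) 2)
          else fcfBsr s value (PySem.Int.floordiv (lo + hi) 2 + 1) hi) = (fcfF s value : Int)
    have hmid₁ : lo ≤ PySem.Int.floordiv (lo + hi) 2 :=
      (PySem.Int.le_floordiv_iff_mul_le (by omega)).mpr (by omega)
    have hmid₂ : PySem.Int.floordiv (lo + hi) 2 < hi :=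
      (PySem.Int.floordiv_lt_iff_lt_mul (by omega)).mpr (by omega)
    set mid := PySem.Int.floordiv (lo + hi) 2 with hmiddef
    have hmidlen : mid.toNat < s.length := by omega
    have hmid0 : (0 : Int) ≤ mid := by omega
    have hget : (PySem.List.pyGet? s mid).getD 0 = s[mid.toNat] := by
      rw [PySem.List.pyGet?_of_nonneg s hmid0, List.getElem?_eq_getElem hmidlen]
      rfl
    rw [hget]
    by_cases hlt : value < s[mid.toNat]
    · rw [if_pos hlt]
      have hFmid : (fcfF s value : Int) ≤ mid := by
        by_contra hc
        have := fcfF_getElem?_le s value mid.toNat (by omega) s[mid.toNat]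
          (List.getElem?_eq_getElem hmidlen)
        omega
      exact fcfBsr_correct s value hs lo mid hlo h1 hFmid (by omega)
    · rw [if_neg hlt]
      have hFmid : mid + 1 ≤ (fcfF s value : Int) := by
        by_contra hc
        have hFlen : fcfF s value < s.length := by omega
        have hgtF := fcfF_getElem?_gt s value (s[fcfF s value]'hFlen)
          (List.getElem?_eq_getElem hFlen)
        have hmono : s[fcfF s value]'hFlen ≤ s[mid.toNat] := by
          rcases Nat.lt_or_ge (fcfF s value) mid.toNat with hlt' | hge'
          · exact (List.pairwise_iff_getElem.mp hs) _ _ hFlen hmidlen hlt'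
          · have hEq : fcfF s value = mid.toNat := by omega
            exact le_of_eq (by congr 1)
        omega
      exact fcfBsr_correct s value hs (mid + 1) hi (by omega) hFmid h2 h3
  · rw [fcfBsr, dif_neg h]
    omega
termination_by (hi - lo).toNat
decreasing_by
  · have : PySem.Int.floordiv (lo + hi) 2 < hi :=
      (PySem.Int.floordiv_lt_iff_lt_mul (by omega)).mpr (by omega)
    have : lo ≤ PySem.Int.floordiv (lo + hi) 2 :=
      (PySem.Int.le_floordiv_iff_mul_le (by omega)).mpr (by omega)
    omega
  · have : lo ≤ PySem.Int.floordiv (lo + hi) 2 :=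
      (PySem.Int.le_floordiv_iff_mul_le (by omega)).mpr (by omega)
    omega

-- ===== VERDICT (by name: the statement is the Claim_ definition above) =====
theorem find_closest_factor_py_spec : Claim_equal_find_closest_factor_py := by
  intro factors value _
  unfold Spec_find_closest_factor_py
  by_cases hnil : factors = []
  · simp [find_closest_factor_py, find_closest_factor_py_alt, hnil]
  · simp only [find_closest_factor_py, find_closest_factor_py_alt, if_neg hnil]
    set s := PySem.List.sorted factors (fun x => x) false with hsdef
    have hsne : s ≠ [] := by
      rw [hsdef]
      simpa [PySem.List.sorted_eq_nil_iff] using hnil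
    have hslen : 0 < s.length := List.length_pos_iff.mpr hsne
    have hs : s.Pairwise (· ≤ ·) := by
      simpa using PySem.List.sorted_pairwise (xs := factors) (key := fun x => x)
    have hscan := fcfScan_range s value 0 (by omega) (by omega)
    have hbsr := fcfBsr_correct s value hs 0 (s.length : Int) le_rfl
      (by exact_mod_cast Nat.zero_le _) (by exact_mod_cast fcfF_le s value) le_rfl
    simp only [Nat.cast_zero] at hscan
    rw [hscan, hbsr]
    set F := fcfF s value with hFdef
    by_cases hFlt : F < s.length
    · simp only [if_pos hFlt]
      by_cases hF0 : 0 < F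
      · simp [hF0]
      · have h0 : F = 0 := by omega
        simp [h0]
    · have hFeq : F = s.length := le_antisymm (hFdef ▸ fcfF_le s value) (by omega)
      simp only [if_neg hFlt]
      simp [hFeq, hsne]
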